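-- pv_equiv track=rewrite | github.com/joshuarmost/Arr-Scraper | tools/backfill_openmetrics.py | build_cumulative_by_date_radarr
-- ===== SOURCE A (Python) =====
-- from collections import defaultdict
--
-- def iso_date(dt_str: str) -> str:
--     return dt_str.split("T")[0]
--
-- def build_cumulative_by_date_radarr(movies):
--     date_counts = defaultdict(int)
--     for m in movies:
--         added = m.get("added")
--         if added:
--             date_counts[iso_date(added)] += 1
--     total = 0
--     out = []  # list of (date_str, value)
--     for d in sorted(date_counts.keys()):
--         total += date_counts[d]
--         out.append((d, total))
--     return out
-- ===== SOURCE B (Python) =====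
-- def build_cumulative_by_date_radarr(movies):
--     dates = sorted(m["added"].split("T")[0] for m in movies if m.get("added"))
--     out = []
--     prev = None
--     total = 0
--     for d in dates:
--         if prev is not None and d != prev:
--             out.append((prev, total))
--         total += 1
--         prev = d
--     if prev is not None:
--         out.append((prev, total))
--     return out
-- ===== Notes on version B (the rewrite author's own statement) =====
-- stated objective: simpler
-- what changed: Instead of grouping counts in a defaultdict and then accumulating over its sorted keys, B sorts the flat list of ISO dates once and emits (date, running_total) at each run boundary in a single pass; no dict is built.
import Mathlib
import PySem

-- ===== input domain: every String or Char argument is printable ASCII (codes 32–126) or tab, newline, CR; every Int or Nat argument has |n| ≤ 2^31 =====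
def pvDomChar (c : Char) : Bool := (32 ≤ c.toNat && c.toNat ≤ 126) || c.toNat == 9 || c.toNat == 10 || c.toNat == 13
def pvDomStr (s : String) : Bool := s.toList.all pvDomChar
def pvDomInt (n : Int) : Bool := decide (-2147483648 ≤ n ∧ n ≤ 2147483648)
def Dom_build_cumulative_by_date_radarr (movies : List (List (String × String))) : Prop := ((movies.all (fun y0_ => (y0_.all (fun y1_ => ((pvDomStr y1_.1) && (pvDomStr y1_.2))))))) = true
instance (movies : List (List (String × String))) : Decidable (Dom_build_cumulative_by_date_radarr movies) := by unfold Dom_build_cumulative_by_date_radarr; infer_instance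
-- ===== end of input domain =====

-- B replaces A's defaultdict-of-counts + sorted-keys accumulation by sorting the flat
-- list of ISO dates once and emitting the running total at each run boundary (simpler;
-- no speed claim).

-- ===== PORT A =====
-- dt_str.split("T")[0]; split? is some (sep "T" ≠ "") and never empty, so [0] is its head
def iso_date (dt_str : String) : String := (((PySem.Str.split? dt_str "T").getD []).headD "")

def build_cumulative_by_date_radarr (movies : List (List (String × String))) : List (String × Int) :=
  let date_counts : PySem.Dict String Int :=
    movies.foldl (fun d m =>
      match (PySem.Dict.ofList m).get? "added" with
      | some added => if added ≠ "" then d.modify (iso_date added) 0 (· + 1) else d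
      | none => d) PySem.Dict.empty
  ((PySem.List.sorted date_counts.keys (fun x => x) false).foldl
      (fun (st : Int × List (String × Int)) d =>
        (st.1 + date_counts.getD d 0, st.2 ++ [(d, st.1 + date_counts.getD d 0)]))
      (0, [])).2

-- ===== PORT B =====
-- the generator expression: m["added"].split("T")[0] for m in movies if m.get("added")
def pvExtract (m : List (String × String)) : Option String :=
  match (PySem.Dict.ofList m).get? "added" with
  | some s => if s ≠ "" then some ((((PySem.Str.split? s "T").getD []).headD "")) else none
  | none => none

def build_cumulative_by_date_radarr_alt (movies : List (List (String × String))) : List (String × Int) :=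
  let dates := PySem.List.sorted (movies.filterMap pvExtract) (fun x => x) false
  let st := dates.foldl
    (fun (st : Option String × Int × List (String × Int)) d =>
      let out := match st.1 with
        | some prev => if d ≠ prev then st.2.2 ++ [(prev, st.2.1)] else st.2.2
        | none => st.2.2
      (some d, st.2.1 + 1, out)) (none, 0, [])
  match st.1 with
  | some prev => st.2.2 ++ [(prev, st.2.1)]
  | none => st.2.2

-- ===== PRECONDITION & SPEC =====
def Spec_build_cumulative_by_date_radarr (movies : List (List (String × String))) (out : List (String × Int)) : Prop := out = build_cumulative_by_date_radarr_alt movies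
instance (movies : List (List (String × String))) (out : List (String × Int)) : Decidable (Spec_build_cumulative_by_date_radarr movies out) := by unfold Spec_build_cumulative_by_date_radarr; infer_instance

-- ===== CLAIM (what is proved, stated in full; the proofs are below) =====
def Claim_equal_build_cumulative_by_date_radarr : Prop := ∀ (movies : List (List (String × String))), Dom_build_cumulative_by_date_radarr movies → Spec_build_cumulative_by_date_radarr movies (build_cumulative_by_date_radarr movies)

-- ===== LEMMAS AND PROOFS =====

-- cumulative map over a key list: (d, running total) for each key
def pvCum (c : String → Int) : List String → Int → List (String × Int)
  | [], _ => []
  | d :: K, t => (d, t + c d) :: pvCum c K (t + c d)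

-- run dedup of a (sorted) list: one representative per run
def pvRundedup : List String → List String
  | [] => []
  | [d] => [d]
  | d :: d' :: L => if d = d' then pvRundedup (d' :: L) else d :: pvRundedup (d' :: L)

-- A's counting loop over movies = a Counter fold over the extracted dates
theorem pvA_fold (movies : List (List (String × String))) (d : PySem.Dict String Int) :
    movies.foldl (fun d m =>
      match (PySem.Dict.ofList m).get? "added" with
      | some added => if added ≠ "" then d.modify (iso_date added) 0 (· + 1) else d
      | none => d) d
    = (movies.filterMap pvExtract).foldl (fun d x => d.modify x 0 (· + 1)) d := by
  induction movies generalizing d with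
  | nil => rfl
  | cons m ms ih =>
    have hstep : (match (PySem.Dict.ofList m).get? "added" with
        | some added => if added ≠ "" then d.modify (iso_date added) 0 (· + 1) else d
        | none => d)
        = (match pvExtract m with
          | some x => d.modify x 0 (· + 1)
          | none => d) := by
      unfold pvExtract iso_date
      cases (PySem.Dict.ofList m).get? "added" with
      | none => rfl
      | some s => by_cases hs : s = "" <;> simp [hs]
    simp only [List.foldl_cons, List.filterMap_cons]
    rw [hstep]
    cases pvExtract m with
    | none => exact ih d
    | some x => exact ih _

-- A's output loop = pvCum
theorem pvA_cum (c : String → Int) (K : List String) (t : Int) (acc : List (String × Int)) :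
    (K.foldl (fun (st : Int × List (String × Int)) d =>
        (st.1 + c d, st.2 ++ [(d, st.1 + c d)])) (t, acc)).2
    = acc ++ pvCum c K t := by
  induction K generalizing t acc with
  | nil => simp [pvCum]
  | cons d K ih => simp [pvCum, ih]

theorem pvCum_congr (c c' : String → Int) (K : List String) (t : Int)
    (h : ∀ d ∈ K, c d = c' d) : pvCum c K t = pvCum c' K t := by
  induction K generalizing t with
  | nil => rfl
  | cons d K ih =>
    simp only [pvCum, h d (by simp)]
    exact congrArg _ (ih _ (fun e he => h e (by simp [he])))

theorem pvRundedup_cons (d : String) (L : List String) :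
    ∃ T, pvRundedup (d :: L) = d :: T ∧ ∀ x ∈ T, x ∈ L := by
  induction L generalizing d with
  | nil => exact ⟨[], rfl, by simp⟩
  | cons d' L ih =>
    rcases ih d' with ⟨T, hT, hm⟩
    by_cases h : d = d'
    · exact ⟨T, by simpa [pvRundedup, h] using hT, fun x hx => by simp [hm x hx]⟩
    · refine ⟨pvRundedup (d' :: L), by simp [pvRundedup, h], fun x hx => ?_⟩
      rw [hT] at hx
      rcases List.mem_cons.mp hx with rfl | hx'
      · simp
      · simp [hm x hx']

theorem pvMem_rundedup (L : List String) (x : String) : x ∈ pvRundedup L ↔ x ∈ L := by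
  induction L with
  | nil => simp [pvRundedup]
  | cons d L ih =>
    cases L with
    | nil => simp [pvRundedup]
    | cons d' L' =>
      by_cases h : d = d'
      · simp only [pvRundedup, if_pos h, ih]
        constructor
        · intro hx; exact List.mem_cons_of_mem _ hx
        · intro hx
          rcases List.mem_cons.mp hx with rfl | hx
          · exact h ▸ List.mem_cons_self
          · exact hx
      · simp only [pvRundedup, if_neg h, List.mem_cons, ih]

theorem pvRundedup_pairwise (L : List String) (h : L.Pairwise (· ≤ ·)) :
    (pvRundedup L).Pairwise (· < ·) := by
  induction L with
  | nil => simp [pvRundedup]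
  | cons d L ih =>
    cases L with
    | nil => simp [pvRundedup]
    | cons d' L' =>
      have hdle : ∀ y ∈ d' :: L', d ≤ y := (List.pairwise_cons.mp h).1
      have hrest := ih (List.pairwise_cons.mp h).2
      by_cases hdd : d = d'
      · simpa [pvRundedup, hdd] using hrest
      · have hlt : ∀ y ∈ pvRundedup (d' :: L'), d < y := by
          intro y hy
          have hyL : y ∈ d' :: L' := (pvMem_rundedup _ _).mp hy
          have hd'y : d' ≤ y := by
            rcases List.mem_cons.mp hyL with rfl | hy'
            · exact le_refl y
            · exact List.rel_of_pairwise_cons (List.pairwise_cons.mp h).2 hy'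
          exact lt_of_lt_of_le (lt_of_le_of_ne (hdle d' (by simp)) hdd) hd'y
        rw [show pvRundedup (d :: d' :: L') = d :: pvRundedup (d' :: L') from by
          simp [pvRundedup, hdd]]
        exact List.pairwise_cons.mpr ⟨hlt, hrest⟩

-- the scan recursion B's fold computes
def pvScan : Option String → Int → List String → List (String × Int)
  | none, _, [] => []
  | some p, t, [] => [(p, t)]
  | none, t, d :: L => pvScan (some d) (t + 1) L
  | some p, t, d :: L =>
      if d ≠ p then (p, t) :: pvScan (some d) (t + 1) L else pvScan (some p) (t + 1) L

-- B's fold-plus-final-flush = pvScan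
theorem pvB_scan (L : List String) (pv : Option String) (t : Int) (acc : List (String × Int)) :
    (let st := L.foldl
        (fun (st : Option String × Int × List (String × Int)) d =>
          (some d, st.2.1 + 1,
            match st.1 with
            | some prev => if d ≠ prev then st.2.2 ++ [(prev, st.2.1)] else st.2.2
            | none => st.2.2)) (pv, t, acc);
      match st.1 with
      | some prev => st.2.2 ++ [(prev, st.2.1)]
      | none => st.2.2)
    = acc ++ pvScan pv t L := by
  induction L generalizing pv t acc with
  | nil => cases pv <;> simp [pvScan]
  | cons d L ih =>
    cases pv with
    | none => simpa [pvScan] using ih (some d) (t + 1) acc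
    | some p =>
      by_cases hdp : d = p
      · simpa [pvScan, hdp] using ih (some p) (t + 1) acc
      · simpa [pvScan, hdp] using ih (some d) (t + 1) (acc ++ [(p, t)])

-- the heart: scanning a run with open state (some p, t)
theorem pvScan_cum (L : List String) (p : String) (t : Int)
    (hs : L.Pairwise (· ≤ ·)) (hle : ∀ x ∈ L, p ≤ x) :
    pvScan (some p) t L
    = pvCum (fun d => ((p :: L).count d : Int)) (pvRundedup (p :: L)) (t - 1) := by
  induction L generalizing p t with
  | nil => simp [pvScan, pvRundedup, pvCum]
  | cons d L ih =>
    have hs' : L.Pairwise (· ≤ ·) := (List.pairwise_cons.mp hs).2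
    have hdle : ∀ x ∈ L, d ≤ x := (List.pairwise_cons.mp hs).1
    by_cases hdp : d = p
    · subst hdp
      simp only [pvScan]
      rw [if_neg (fun h => h rfl)]
      rw [ih d (t + 1) hs' hdle]
      rcases pvRundedup_cons d L with ⟨T, hT, hTm⟩
      have hdT : d ∉ T := by
        have hp := pvRundedup_pairwise (d :: L) hs
        rw [hT] at hp
        intro hmem
        exact lt_irrefl d (List.rel_of_pairwise_cons hp hmem)
      have hrd2 : pvRundedup (d :: d :: L) = d :: T := by
        rw [show pvRundedup (d :: d :: L) = pvRundedup (d :: L) from by simp [pvRundedup]]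
        exact hT
      rw [hT, hrd2]
      have hc2d : (((d :: d :: L).count d : Nat) : Int) = ((d :: L).count d : Int) + 1 := by
        simp
      simp only [pvCum]
      refine congrArg₂ List.cons ?_ ?_
      · rw [Prod.mk.injEq]
        exact ⟨rfl, by rw [hc2d]; ring⟩
      · rw [hc2d]
        rw [show t - 1 + (((d :: L).count d : Int) + 1) = t + 1 - 1 + ((d :: L).count d : Int)
          from by ring]
        apply pvCum_congr
        intro e he
        have hed : e ≠ d := fun h => hdT (h ▸ he)
        simp [Ne.symm hed]
    · have hpd : p < d := lt_of_le_of_ne (hle d (by simp)) (Ne.symm hdp)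
      have hpL : ∀ x ∈ d :: L, p < x := by
        intro x hx
        rcases List.mem_cons.mp hx with rfl | hx'
        · exact hpd
        · exact lt_of_lt_of_le hpd (hdle x hx')
      simp only [pvScan]
      rw [if_pos hdp]
      rw [ih d (t + 1) hs' hdle]
      have hrd : pvRundedup (p :: d :: L) = p :: pvRundedup (d :: L) := by
        simp [pvRundedup, Ne.symm hdp]
      rw [hrd]
      have hpcount : (((p :: d :: L).count p : Nat) : Int) = 1 := by
        have h0 : (d :: L).count p = 0 :=
          List.count_eq_zero.mpr (fun h => lt_irrefl p (hpL p h))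
        simp [h0]
      simp only [pvCum]
      refine congrArg₂ List.cons ?_ ?_
      · rw [Prod.mk.injEq]
        exact ⟨rfl, by rw [hpcount]; ring⟩
      · rw [hpcount]
        rw [show t - 1 + (1 : Int) = t + 1 - 1 from by ring]
        apply pvCum_congr
        intro e he
        have hep : e ≠ p := by
          intro h
          exact lt_irrefl p (hpL p ((pvMem_rundedup _ _).mp (h ▸ he)))
        simp [Ne.symm hep]

theorem pvScan_cum_none (L : List String) (hs : L.Pairwise (· ≤ ·)) :
    pvScan none 0 L = pvCum (fun d => (L.count d : Int)) (pvRundedup L) 0 := by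
  cases L with
  | nil => simp [pvScan, pvRundedup, pvCum]
  | cons d L =>
    have := pvScan_cum L d 1 (List.pairwise_cons.mp hs).2 (List.pairwise_cons.mp hs).1
    simpa [pvScan] using this

-- ===== VERDICT (by name: the statement is the Claim_ definition above) =====
theorem build_cumulative_by_date_radarr_spec : Claim_equal_build_cumulative_by_date_radarr := by
  intro movies _
  unfold Spec_build_cumulative_by_date_radarr
  unfold build_cumulative_by_date_radarr build_cumulative_by_date_radarr_alt
  simp only []
  set dates := movies.filterMap pvExtract with hdates
  set L := PySem.List.sorted dates (fun x => x) false with hL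
  -- A's dict is the Counter of dates
  rw [pvA_fold]
  have hctr : (movies.filterMap pvExtract).foldl (fun d x => d.modify x 0 (· + 1)) PySem.Dict.empty
      = PySem.Dict.counter dates := by
    rw [hdates, PySem.Dict.counter_eq_foldl]
  rw [hctr]
  rw [pvA_cum]
  -- B's side: fold + flush = scan = cum over rundedup
  have hsortedL : L.Pairwise (· ≤ ·) := by
    simpa using PySem.List.sorted_pairwise dates (fun x => x)
  have hperm : L.Perm dates := PySem.List.sorted_perm dates (fun x => x) false
  have hB := pvB_scan L none 0 []
  rw [pvScan_cum_none L hsortedL] at hB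
  -- identify A's key list with rundedup L
  have hkeys : PySem.Dict.keys (PySem.Dict.counter dates) = PySem.Set.ofList dates :=
    PySem.Dict.keys_counter dates
  have hrdL_pairwise : (pvRundedup L).Pairwise (· < ·) := pvRundedup_pairwise L hsortedL
  have hrdL_nodup : (pvRundedup L).Nodup :=
    hrdL_pairwise.imp (fun h => ne_of_lt h)
  have hmemL : ∀ x, x ∈ pvRundedup L ↔ x ∈ PySem.Set.ofList dates := by
    intro x
    rw [pvMem_rundedup, PySem.Set.mem_ofList]
    exact ⟨fun h => hperm.mem_iff.mp h, fun h => hperm.mem_iff.mpr h⟩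
  have hpermK : (pvRundedup L).Perm (PySem.Set.ofList dates) :=
    (List.perm_ext_iff_of_nodup hrdL_nodup (PySem.Set.nodup_ofList dates)).mpr hmemL
  have hKeq : PySem.List.sorted (PySem.Set.ofList dates) (fun x => x) false = pvRundedup L :=
    PySem.List.sorted_eq_of_perm_of_pairwise_lt _ _ _ hpermK hrdL_pairwise
  rw [hkeys, hKeq]
  rw [hB]
  simp only [List.nil_append]
  apply pvCum_congr
  intro e _
  rw [PySem.Dict.getD_counter]
  exact congrArg _ (hperm.count_eq e).symm
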